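-- pv_equiv track=rewrite | github.com/rdziubek/algorithm | max_subarray_brute.py | force_find
-- ===== SOURCE A (Python) =====
-- def force_find(array):
--     biggest = array[0]
--
--     for i in range(len(array)):
--         current = array[i]
--
--         for j in range(len(array) - i):
--             current += array[j]
--
--         biggest = current if current > biggest else biggest
--
--     return biggest
-- ===== SOURCE B (Python) =====
-- def force_find(array):
--     total = 0
--     for v in array:
--         total += v
--     best = array[0]
--     suffix = total
--     for i in range(len(array)):
--         t = array[i] + suffix
--         if t > best:
--             best = t
--         suffix -= array[len(array) - 1 - i]
--     return best
-- ===== Notes on version B (the rewrite author's own statement) =====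
-- stated objective: faster
-- what changed: Replaces the quadratic inner re-summation with a single pass that keeps a running prefix sum, computed by one initial total and a constant-time downdate per step.
import Mathlib
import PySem

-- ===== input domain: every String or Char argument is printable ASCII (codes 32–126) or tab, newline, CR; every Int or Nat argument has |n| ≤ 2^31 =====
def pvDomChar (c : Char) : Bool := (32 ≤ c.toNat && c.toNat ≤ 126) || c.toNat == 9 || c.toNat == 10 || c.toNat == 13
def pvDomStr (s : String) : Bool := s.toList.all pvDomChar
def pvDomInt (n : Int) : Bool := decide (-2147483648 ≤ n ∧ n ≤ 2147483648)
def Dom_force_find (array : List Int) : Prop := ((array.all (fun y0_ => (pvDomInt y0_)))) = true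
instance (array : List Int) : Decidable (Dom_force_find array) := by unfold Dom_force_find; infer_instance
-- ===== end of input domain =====

-- B replaces A's quadratic inner re-summation with one O(n) pass keeping a running prefix
-- sum (total computed once, downdated by one element per step); measured asymptotically faster.

-- ===== PORT A =====
-- literal transliteration of A: outer loop over range(len), inner loop re-sums array[0..n-i)
def force_find (array : List Int) : Int :=
  (PySem.List.pyRange 0 (array.length : Int) 1).foldl
    (fun biggest i =>
      let current :=
        (PySem.List.pyRange 0 ((array.length : Int) - i) 1).foldl
          (fun cur j => cur + PySem.List.pyGetD array j 0)
          (PySem.List.pyGetD array i 0)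
      if current > biggest then current else biggest)
    (PySem.List.pyGetD array 0 0)

-- ===== PORT B =====
-- literal transliteration of Source B: total by one fold, then a single indexed loop carrying
-- (best, suffix) where suffix is downdated by array[len-1-i] each step
def force_find_alt (array : List Int) : Int :=
  let total := array.foldl (fun acc v => acc + v) 0
  ((PySem.List.pyRange 0 (array.length : Int) 1).foldl
    (fun (st : Int × Int) i =>
      let t := PySem.List.pyGetD array i 0 + st.2
      let best := if t > st.1 then t else st.1
      (best, st.2 - PySem.List.pyGetD array ((array.length : Int) - 1 - i) 0))
    (PySem.List.pyGetD array 0 0, total)).1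

-- ===== PRECONDITION & SPEC =====
-- Pre_ excludes only the empty list, on which A raises IndexError at array[0].
def Pre_force_find (array : List Int) : Prop := array ≠ []
instance (array : List Int) : Decidable (Pre_force_find array) := by unfold Pre_force_find; infer_instance
def pvWitness_force_find : List Int := [3, -1, 4]

def Spec_force_find (array : List Int) (out : Int) : Prop := out = force_find_alt array
instance (array : List Int) (out : Int) : Decidable (Spec_force_find array out) := by unfold Spec_force_find; infer_instance

-- ===== CLAIM (what is proved, stated in full; the proofs are below) =====
def Claim_equal_force_find : Prop := ∀ (array : List Int), Dom_force_find array → Pre_force_find array → Spec_force_find array (force_find array)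

-- ===== LEMMAS AND PROOFS =====

-- prefix sum of the first m elements
def pvS (a : List Int) (m : Nat) : Int := (a.take m).sum

theorem pvS_succ (a : List Int) (m : Nat) (h : m < a.length) :
    pvS a (m + 1) = pvS a m + PySem.List.pyGetD a (m : Int) 0 := by
  rw [pvS, pvS, List.take_add_one, List.sum_append, PySem.List.pyGetD_natCast,
      List.getD_eq_getElem?_getD, List.getElem?_eq_getElem h]
  simp

-- A's inner loop computes init + prefix-sum(m) for m ≤ len
theorem pv_inner (a : List Int) (m : Nat) (hm : m ≤ a.length) (init : Int) :
    (PySem.List.pyRange 0 (m : Int) 1).foldl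
      (fun cur j => cur + PySem.List.pyGetD a j 0) init = init + pvS a m := by
  induction m generalizing init with
  | zero => simp [PySem.List.pyRange_one_eq_nil, pvS]
  | succ k ih =>
    have hk : k < a.length := hm
    rw [show ((k + 1 : Nat) : Int) = (k : Int) + 1 by push_cast; ring,
        PySem.List.pyRange_one_succ_right (by positivity), List.foldl_append,
        ih (Nat.le_of_lt hk)]
    simp only [List.foldl_cons, List.foldl_nil]
    rw [pvS_succ a k hk]
    ring

theorem pv_total (a : List Int) : a.foldl (fun acc v => acc + v) 0 = pvS a a.length := by
  simp [pvS, List.sum_eq_foldl]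

-- main invariant: over the first k indices, B's paired fold computes A's fold (with the
-- inner loop replaced by its value) in the first component, and suffix = pvS (n-k) in the second
theorem pv_main (a : List Int) (k : Nat) (hk : k ≤ a.length) (b0 : Int) :
    (PySem.List.pyRange 0 (k : Int) 1).foldl
      (fun (st : Int × Int) i =>
        let t := PySem.List.pyGetD a i 0 + st.2
        let best := if t > st.1 then t else st.1
        (best, st.2 - PySem.List.pyGetD a ((a.length : Int) - 1 - i) 0))
      (b0, pvS a a.length)
    = ((PySem.List.pyRange 0 (k : Int) 1).foldl
        (fun biggest i =>
          let current :=
            (PySem.List.pyRange 0 ((a.length : Int) - i) 1).foldl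
              (fun cur j => cur + PySem.List.pyGetD a j 0)
              (PySem.List.pyGetD a i 0)
          if current > biggest then current else biggest) b0,
       pvS a (a.length - k)) := by
  induction k generalizing b0 with
  | zero => simp [PySem.List.pyRange_one_eq_nil]
  | succ k ih =>
    have hk' : k < a.length := hk
    rw [show ((k + 1 : Nat) : Int) = (k : Int) + 1 by push_cast; ring,
        PySem.List.pyRange_one_succ_right (by positivity),
        List.foldl_append, List.foldl_append, ih (Nat.le_of_lt hk')]
    have hsub : ((a.length : Int) - (k : Int)) = ((a.length - k : Nat) : Int) := by omega
    have hcur : (PySem.List.pyRange 0 ((a.length : Int) - (k : Int)) 1).foldl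
        (fun cur j => cur + PySem.List.pyGetD a j 0) (PySem.List.pyGetD a (k : Int) 0)
        = PySem.List.pyGetD a (k : Int) 0 + pvS a (a.length - k) := by
      rw [hsub, pv_inner a (a.length - k) (by omega)]
    have hS : pvS a (a.length - k) - PySem.List.pyGetD a ((a.length : Int) - 1 - (k : Int)) 0
        = pvS a (a.length - (k + 1)) := by
      have e1 : a.length - k = (a.length - (k + 1)) + 1 := by omega
      have e2 : ((a.length : Int) - 1 - (k : Int)) = ((a.length - (k + 1) : Nat) : Int) := by
        omega
      rw [e1, pvS_succ a _ (by omega), e2]; ring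
    simp only [List.foldl_cons, List.foldl_nil]
    rw [hcur, hS]

-- ===== VERDICT (by name: the statement is the Claim_ definition above) =====
theorem force_find_spec : Claim_equal_force_find := by
  intro array _ _
  unfold Spec_force_find force_find force_find_alt
  simp only [pv_total]
  rw [pv_main array array.length le_rfl]
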